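-- pv_equiv track=rewrite | github.com/denyadenya77/beetroot_lessons | lesson_8/presentation/4.py | cross_and_combine
-- ===== SOURCE A (Python) =====
-- def cross_and_combine(a):
--     cross_subset = set(a[0])
--     combite_list = a[0]
--     i = 1
--     #cross
--     while i < len(a):
--         cross_subset = cross_subset.intersection(set(a[i]))
--         # combine
--         combite_list = combite_list + a[i]
--         i += 1
--
--
--
--     return cross_subset, sorted(combite_list)
-- ===== SOURCE B (Python) =====
-- def cross_and_combine(a):
--     # different decomposition: per-element membership filter over a[0] (vs A's iterated
--     # set intersection), and one sorted pass over the flattened input (vs repeated list +).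
--     first = a[0]
--     rest_sets = [set(xs) for xs in a[1:]]
--     inter = {x for x in first if all(x in s for s in rest_sets)}
--     combined = sorted(x for xs in a for x in xs)
--     return inter, combined
-- ===== Notes on version B (the rewrite author's own statement) =====
-- stated objective: alternative
-- what changed: Replaces the while-loop that repeatedly rebuilds the intersection set and concatenates lists by a single membership-filter comprehension over a[0] against precomputed sets, and one sorted pass over the flattened input (avoiding quadratic repeated list +).
-- outside the precondition, e.g. on cross_and_combine([]): A raises IndexError, B raises IndexError
import Mathlib
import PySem

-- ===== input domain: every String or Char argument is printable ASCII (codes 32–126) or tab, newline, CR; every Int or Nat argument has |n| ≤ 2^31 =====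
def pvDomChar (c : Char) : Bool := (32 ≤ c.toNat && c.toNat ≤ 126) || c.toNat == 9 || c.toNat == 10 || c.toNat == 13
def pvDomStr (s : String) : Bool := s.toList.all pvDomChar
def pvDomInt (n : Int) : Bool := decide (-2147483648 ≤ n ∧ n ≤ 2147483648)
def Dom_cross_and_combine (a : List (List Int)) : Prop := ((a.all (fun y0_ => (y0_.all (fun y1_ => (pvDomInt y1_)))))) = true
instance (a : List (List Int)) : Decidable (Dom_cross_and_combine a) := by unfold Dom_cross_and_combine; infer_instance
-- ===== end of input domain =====

-- B computes the intersection by a membership-filter comprehension over a[0] and sorts the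
-- flattened input once, instead of A's while-loop of set intersections and list concatenations.
-- Both raise IndexError on a = []; that input is excluded by Pre_.

-- ===== PORT A =====
-- a[0] raises IndexError on empty a (excluded by Pre_); the while loop over i = 1..len(a)-1
-- is the fold over a's tail, carrying the pair (cross_subset, combite_list).
def cross_and_combine (a : List (List Int)) : List Int × List Int :=
  match a with
  | [] => ([], [])
  | a0 :: rest =>
    let st := rest.foldl
      (fun (st : List Int × List Int) xs =>
        (PySem.Set.inter st.1 (PySem.Set.ofList xs), st.2 ++ xs))
      (PySem.Set.ofList a0, a0)
    (st.1, PySem.List.sorted st.2 (fun x => x) false)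

-- ===== PORT B =====
def cross_and_combine_alt (a : List (List Int)) : List Int × List Int :=
  match a with
  | [] => ([], [])
  | a0 :: rest =>
    let restSets := rest.map (fun xs => PySem.Set.ofList xs)
    let inter := PySem.Set.ofList
      (a0.filter (fun x => restSets.all (fun s => PySem.Set.contains s x)))
    let combined := PySem.List.sorted ((a0 :: rest).flatMap (fun xs => xs)) (fun x => x) false
    (inter, combined)

-- ===== PRECONDITION & SPEC =====
-- Pre_ excludes only the empty list, on which A's a[0] raises IndexError.
def Pre_cross_and_combine (a : List (List Int)) : Prop := a ≠ []
instance (a : List (List Int)) : Decidable (Pre_cross_and_combine a) := by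
  unfold Pre_cross_and_combine; infer_instance
def pvWitness_cross_and_combine : List (List Int) := [[1, 2, 3], [2, 3, 4]]
def Spec_cross_and_combine (a : List (List Int)) (out : List Int × List Int) : Prop := out = cross_and_combine_alt a
instance (a : List (List Int)) (out : List Int × List Int) : Decidable (Spec_cross_and_combine a out) := by unfold Spec_cross_and_combine; infer_instance

-- ===== CLAIM (what is proved, stated in full; the proofs are below) =====
def Claim_equal_cross_and_combine : Prop := ∀ (a : List (List Int)), Dom_cross_and_combine a → Pre_cross_and_combine a → Spec_cross_and_combine a (cross_and_combine a)

-- ===== LEMMAS AND PROOFS =====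

-- Set.add commutes with filter.
theorem pv_filter_add (s : List Int) (x : Int) (p : Int → Bool) :
    (PySem.Set.add s x).filter p =
      (if p x then PySem.Set.add (s.filter p) x else s.filter p) := by
  by_cases hx : x ∈ s <;> by_cases hp : p x <;>
    simp [PySem.Set.add, PySem.Set.contains, List.filter_append, List.mem_filter, hx, hp]

-- ofList commutes with filter.
theorem pv_foldl_add_filter (p : Int → Bool) :
    ∀ (xs acc : List Int),
      (xs.foldl PySem.Set.add acc).filter p =
        (xs.filter p).foldl PySem.Set.add (acc.filter p)
  | [], acc => rfl
  | x :: t, acc => by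
    simp only [List.foldl_cons, pv_foldl_add_filter p t, pv_filter_add, List.filter_cons]
    by_cases hp : p x <;> simp [hp]

theorem pv_ofList_filter (xs : List Int) (p : Int → Bool) :
    (PySem.Set.ofList xs).filter p = PySem.Set.ofList (xs.filter p) := by
  rw [PySem.Set.ofList_eq_foldl, PySem.Set.ofList_eq_foldl, pv_foldl_add_filter]
  rfl

-- Set.inter is a membership filter.
theorem pv_inter_eq_filter (s t : List Int) :
    PySem.Set.inter s t = s.filter (fun x => PySem.Set.contains t x) := rfl

-- the intersection fold is one membership filter
theorem pv_fold_inter (rest : List (List Int)) (s : List Int) :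
    rest.foldl (fun s xs => PySem.Set.inter s (PySem.Set.ofList xs)) s =
      s.filter (fun x => rest.all (fun xs => PySem.Set.contains (PySem.Set.ofList xs) x)) := by
  induction rest generalizing s with
  | nil => simp
  | cons y t ih =>
    rw [List.foldl_cons, ih, pv_inter_eq_filter, List.filter_filter]
    exact List.filter_congr (fun x _ => by simp [Bool.and_comm])

-- the concatenation fold is flatten
theorem pv_fold_append (rest : List (List Int)) (a0 : List Int) :
    rest.foldl (fun acc xs => acc ++ xs) a0 = a0 ++ rest.flatten := by
  induction rest generalizing a0 with
  | nil => simp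
  | cons y t ih => simp [ih]

-- ===== VERDICT (by name: the statement is the Claim_ definition above) =====
theorem cross_and_combine_spec : Claim_equal_cross_and_combine := by
  intro a _ hpre
  unfold Spec_cross_and_combine
  match a with
  | [] => exact absurd rfl hpre
  | a0 :: rest =>
    simp only [cross_and_combine, cross_and_combine_alt]
    rw [PySem.List.foldl_prod_mk
        (f := fun s xs => PySem.Set.inter s (PySem.Set.ofList xs))
        (g := fun acc xs => acc ++ xs)]
    rw [pv_fold_inter, pv_fold_append, pv_ofList_filter]
    simp [List.flatMap_def, List.all_map, Function.comp_def, PySem.Set.mem_ofList]
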